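-- pv_equiv track=rewrite | github.com/kh277/BOJ | 백준/Silver/15903. 카드 합체 놀이/카드 합체 놀이.py | solve
-- ===== SOURCE A (Python) =====
-- import heapq
--
-- def solve(N, M, A):
--     heapq.heapify(A)
--     for _ in range(M):
--         a = heapq.heappop(A)
--         b = heapq.heappop(A)
--         add = a+b
--         heapq.heappush(A, add)
--         heapq.heappush(A, add)
--
--     return sum(A)
-- ===== SOURCE B (Python) =====
-- def solve(N, M, A):
--     for _ in range(M):
--         a = A.pop(A.index(min(A)))
--         b = A.pop(A.index(min(A)))
--         add = a + b
--         A.append(add)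
--         A.append(add)
--     return sum(A)
-- ===== Notes on version B (the rewrite author's own statement) =====
-- stated objective: simpler
-- what changed: Replaces the heapq priority queue with a plain list scanned by min()/index()/pop() each round: no heap, no heapify, just repeated min-scan-and-remove.
import Mathlib
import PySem

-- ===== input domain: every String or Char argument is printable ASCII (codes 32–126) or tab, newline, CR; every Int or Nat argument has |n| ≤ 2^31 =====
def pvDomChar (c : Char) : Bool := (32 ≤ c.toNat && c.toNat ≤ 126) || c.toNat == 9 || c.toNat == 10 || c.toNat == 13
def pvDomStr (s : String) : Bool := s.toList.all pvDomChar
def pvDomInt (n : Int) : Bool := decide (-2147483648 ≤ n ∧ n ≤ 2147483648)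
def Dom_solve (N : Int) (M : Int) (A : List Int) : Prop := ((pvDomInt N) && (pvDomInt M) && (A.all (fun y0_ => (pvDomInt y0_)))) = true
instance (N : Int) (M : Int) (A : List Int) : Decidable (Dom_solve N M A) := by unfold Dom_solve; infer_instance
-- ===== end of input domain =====

-- B replaces A's heapq priority queue with plain min-scan/remove rounds (objective: simpler).
-- Both Pythons mutate the argument list A in place; only the RETURNED sum is claimed equal.

-- ===== PORT A =====
-- A uses heapq; PySem has no heap primitive, so CPython's heapq (_siftdown, _siftup,
-- heappush, heappop, heapify) is ported by hand below, step for step (exact on all ints).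

-- heapq._siftdown(heap, startpos, pos): the while loop; callers read newitem = heap[pos]
def pySiftdownLoop (heap : List Int) (startpos pos : Nat) (newitem : Int) : List Int :=
  if h : startpos < pos then
    let parentpos := (pos - 1) / 2
    let parent := heap.getD parentpos 0
    if newitem < parent then
      pySiftdownLoop (heap.set pos parent) startpos parentpos newitem
    else heap.set pos newitem
  else heap.set pos newitem
termination_by pos
decreasing_by omega

-- heapq._siftup(heap, pos): the down-phase while loop, final heap[pos] = newitem,
-- and the trailing _siftdown call (endpos = len(heap) stays fixed during the loop)
def pySiftupLoop (heap : List Int) (endpos startpos pos : Nat) (newitem : Int) : List Int :=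
  if h : 2 * pos + 1 < endpos then
    let childpos :=
      if 2 * pos + 2 < endpos ∧ ¬ (heap.getD (2 * pos + 1) 0 < heap.getD (2 * pos + 2) 0)
      then 2 * pos + 2 else 2 * pos + 1
    pySiftupLoop (heap.set pos (heap.getD childpos 0)) endpos startpos childpos newitem
  else pySiftdownLoop (heap.set pos newitem) startpos pos newitem
termination_by endpos - pos
decreasing_by split <;> omega

def pySiftup (heap : List Int) (pos : Nat) : List Int :=
  pySiftupLoop heap heap.length pos pos (heap.getD pos 0)

-- heapq.heappush: heap.append(item); _siftdown(heap, 0, len(heap)-1)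
def pyHeappush (heap : List Int) (item : Int) : List Int :=
  pySiftdownLoop (heap ++ [item]) 0 heap.length item

-- heapq.heappop: lastelt = heap.pop() (IndexError on empty list = none); then swap
-- the last element into the root and _siftup(heap, 0)
def pyHeappop (heap : List Int) : Option (Int × List Int) :=
  match heap.getLast? with
  | none => none
  | some lastelt =>
    let rest := heap.dropLast
    if rest.isEmpty then some (lastelt, rest)
    else some (rest.getD 0 0, pySiftup (rest.set 0 lastelt) 0)

-- heapq.heapify: for i in reversed(range(n//2)): _siftup(x, i)
def pyHeapify (x : List Int) : List Int :=
  (List.range (x.length / 2)).reverse.foldl (fun h i => pySiftup h i) x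

-- one iteration of A's for-loop (none = a heappop raised)
def solveStepA (st : Option (List Int)) : Option (List Int) :=
  match st with
  | none => none
  | some h =>
    match pyHeappop h with
    | none => none
    | some (a, h1) =>
      match pyHeappop h1 with
      | none => none
      | some (b, h2) =>
        let add := a + b
        some (pyHeappush (pyHeappush h2 add) add)

def solve (N : Int) (M : Int) (A : List Int) : Int :=
  match (List.range M.toNat).foldl (fun st _ => solveStepA st) (some (pyHeapify A)) with
  | none => 0
  | some h => h.foldl (· + ·) 0

-- ===== PORT B =====
-- a = A.pop(A.index(min(A)))  (none = min() of an empty list raised ValueError)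
def bPopMin (l : List Int) : Option (Int × List Int) :=
  match PySem.List.min? l (fun x => x) with
  | none => none
  | some m =>
    match PySem.List.index? l m with
    | none => none
    | some i => PySem.List.pop? l (i : Int)

-- one iteration of B's for-loop
def solveStepB (st : Option (List Int)) : Option (List Int) :=
  match st with
  | none => none
  | some l =>
    match bPopMin l with
    | none => none
    | some (a, l1) =>
      match bPopMin l1 with
      | none => none
      | some (b, l2) =>
        let add := a + b
        some ((l2 ++ [add]) ++ [add])

def solve_alt (N : Int) (M : Int) (A : List Int) : Int :=
  match (List.range M.toNat).foldl (fun st _ => solveStepB st) (some A) with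
  | none => 0
  | some l => l.foldl (· + ·) 0

-- ===== PRECONDITION & SPEC =====
-- Pre_ excludes exactly the inputs on which A raises: with M ≥ 1 rounds and fewer than
-- two cards A's heappop raises IndexError (B raises there too: min()/pop() of empty list).
def Pre_solve (N : Int) (M : Int) (A : List Int) : Prop := M ≤ 0 ∨ 2 ≤ A.length
instance (N : Int) (M : Int) (A : List Int) : Decidable (Pre_solve N M A) := by unfold Pre_solve; infer_instance

def pvWitness_solve : Int × Int × List Int := (3, 2, [4, 2, 3])

def Spec_solve (N : Int) (M : Int) (A : List Int) (out : Int) : Prop := out = solve_alt N M A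
instance (N : Int) (M : Int) (A : List Int) (out : Int) : Decidable (Spec_solve N M A out) := by unfold Spec_solve; infer_instance

-- ===== CLAIM (what is proved, stated in full; the proofs are below) =====
def Claim_equal_solve : Prop := ∀ (N : Int) (M : Int) (A : List Int), Dom_solve N M A → Pre_solve N M A → Spec_solve N M A (solve N M A)

-- ===== LEMMAS AND PROOFS =====

def IsChild (p c : Nat) : Prop := c = 2 * p + 1 ∨ c = 2 * p + 2
def HeapFrom (s : Nat) (l : List Int) : Prop :=
  ∀ p c : Nat, s ≤ p → IsChild p c → c < l.length → l.getD p 0 ≤ l.getD c 0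
def DescFrom (s pos : Nat) : Prop :=
  if pos = s then True else if s < pos then DescFrom s ((pos - 1) / 2) else False
termination_by pos
decreasing_by omega
theorem descFrom_iff (s pos : Nat) :
    DescFrom s pos ↔ (pos = s ∨ (s < pos ∧ DescFrom s ((pos - 1) / 2))) := by
  rw [DescFrom]; split_ifs <;> simp_all
theorem descFrom_le {s pos : Nat} (h : DescFrom s pos) : s ≤ pos := by
  rw [descFrom_iff] at h; rcases h with h | ⟨h, _⟩ <;> omega

theorem descFrom_zero (pos : Nat) : DescFrom 0 pos := by
  induction pos using Nat.strong_induction_on with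
  | _ pos ih =>
    rw [descFrom_iff]
    rcases Nat.eq_zero_or_pos pos with h | h
    · exact Or.inl h
    · exact Or.inr ⟨h, ih _ (by omega)⟩

theorem getD_set (l : List Int) (i j : Nat) (a : Int) :
    (l.set i a).getD j 0 = if i = j ∧ j < l.length then a else l.getD j 0 := by
  simp only [List.getD_eq_getElem?_getD, List.getElem?_set]
  split_ifs with h1 h2 h3 h4 <;> simp_all
theorem getD_set2 (l : List Int) (i1 i2 j : Nat) (a1 a2 : Int) :
    ((l.set i1 a1).set i2 a2).getD j 0 =
      if i2 = j ∧ j < l.length then a2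
      else if i1 = j ∧ j < l.length then a1 else l.getD j 0 := by
  simp only [getD_set, List.length_set]
theorem decomp (l : List Int) (i : Nat) (hi : i < l.length) :
    l = l.take i ++ l[i] :: l.drop (i+1) := by
  conv_lhs => rw [← List.take_append_drop i l, List.drop_eq_getElem_cons hi]
theorem cons_eraseIdx_perm {l : List Int} {i : Nat} (hi : i < l.length) :
    (l[i] :: l.eraseIdx i).Perm l := by
  rw [List.eraseIdx_eq_take_drop_succ]
  conv_rhs => rw [decomp l i hi]
  exact List.perm_middle.symm

theorem set_perm (l : List Int) (i : Nat) (a : Int) (hi : i < l.length) :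
    (l.getD i 0 :: l.set i a).Perm (a :: l) := by
  rw [List.getD_eq_getElem l 0 hi, List.set_eq_take_append_cons_drop, if_pos hi]
  conv_rhs => rw [decomp l i hi]
  refine ((List.Perm.cons _ List.perm_middle).trans ?_)
  refine (List.Perm.swap _ _ _).trans ?_
  exact List.Perm.cons _ List.perm_middle.symm

theorem sdl_eq (heap : List Int) (s pos : Nat) (x : Int) :
    pySiftdownLoop heap s pos x =
      if s < pos then
        (if x < heap.getD ((pos - 1) / 2) 0 then
          pySiftdownLoop (heap.set pos (heap.getD ((pos - 1) / 2) 0)) s ((pos - 1) / 2) x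
        else heap.set pos x)
      else heap.set pos x := by
  rw [pySiftdownLoop]
  split_ifs with h1 h2 <;> simp_all

theorem sdl_spec (s : Nat) (x : Int) :
    ∀ pos (heap : List Int), pos < heap.length → DescFrom s pos →
    (∀ p c, s ≤ p → IsChild p c → c < heap.length → c ≠ pos →
      (heap.set pos x).getD p 0 ≤ (heap.set pos x).getD c 0) →
    (∀ c, IsChild pos c → c < heap.length → pos ≠ s →
      heap.getD ((pos - 1) / 2) 0 ≤ heap.getD c 0) →
    HeapFrom s (pySiftdownLoop heap s pos x) ∧
    (heap.getD pos 0 :: pySiftdownLoop heap s pos x).Perm (x :: heap) ∧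
    (pySiftdownLoop heap s pos x).length = heap.length := by
  intro pos
  induction pos using Nat.strong_induction_on with
  | _ pos ih =>
  intro heap hlen hdesc hi hii
  rw [sdl_eq]
  by_cases hsp : s < pos
  · rw [if_pos hsp]
    by_cases hlt : x < heap.getD ((pos - 1) / 2) 0
    · rw [if_pos hlt]
      have hppos : (pos - 1) / 2 < pos := by omega
      have hdesc' : DescFrom s ((pos - 1) / 2) := by
        rcases (descFrom_iff s pos).1 hdesc with h | ⟨_, h⟩
        · omega
        · exact h
      have hspp : s ≤ (pos - 1) / 2 := descFrom_le hdesc'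
      have hi' : ∀ p c, s ≤ p → IsChild p c → c < heap.length → c ≠ pos → p ≠ pos →
          heap.getD p 0 ≤ heap.getD c 0 := by
        intro p c h1 h2 h3 h4 h5
        have := hi p c h1 h2 h3 h4
        rwa [getD_set, if_neg (by omega), getD_set, if_neg (by omega)] at this
      obtain ⟨H1, H2, H3⟩ := ih ((pos - 1) / 2) hppos (heap.set pos (heap.getD ((pos - 1) / 2) 0))
        (by simp; omega)
        hdesc'
        (by
          intro p c hsc hch hcl hcne
          simp only [List.length_set] at hcl
          have hpc : p < c := by rcases hch with h | h <;> omega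
          rw [getD_set2, getD_set2]
          by_cases hc : c = pos
          · have hp : p = (pos - 1) / 2 := by rcases hch with h | h <;> omega
            rw [if_pos (by omega : (pos - 1) / 2 = p ∧ p < heap.length),
                if_neg (by omega : ¬((pos - 1) / 2 = c ∧ c < heap.length)),
                if_pos (by omega : pos = c ∧ c < heap.length)]
            omega
          · by_cases hp : p = (pos - 1) / 2
            · have := hi' ((pos - 1) / 2) c (by omega) (by rwa [hp] at hch) hcl hc (by omega)
              rw [if_pos (by omega : (pos - 1) / 2 = p ∧ p < heap.length),
                  if_neg (by omega : ¬((pos - 1) / 2 = c ∧ c < heap.length)),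
                  if_neg (by omega : ¬(pos = c ∧ c < heap.length))]
              omega
            · by_cases hp2 : p = pos
              · have := hii c (by rwa [hp2] at hch) hcl (by omega)
                rw [if_neg (by omega : ¬((pos - 1) / 2 = p ∧ p < heap.length)),
                    if_pos (by omega : pos = p ∧ p < heap.length),
                    if_neg (by omega : ¬((pos - 1) / 2 = c ∧ c < heap.length)),
                    if_neg (by omega : ¬(pos = c ∧ c < heap.length))]
                omega
              · have := hi' p c hsc hch hcl hc hp2
                rw [if_neg (by omega : ¬((pos - 1) / 2 = p ∧ p < heap.length)),
                    if_neg (by omega : ¬(pos = p ∧ p < heap.length)),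
                    if_neg (by omega : ¬((pos - 1) / 2 = c ∧ c < heap.length)),
                    if_neg (by omega : ¬(pos = c ∧ c < heap.length))]
                omega)
        (by
          intro c hch hcl hppns
          simp only [List.length_set] at hcl
          have hspp' : s < (pos - 1) / 2 := by
            have := descFrom_le hdesc'; omega
          have hgp : s ≤ ((pos - 1) / 2 - 1) / 2 := by
            rcases (descFrom_iff s ((pos - 1) / 2)).1 hdesc' with h | ⟨_, h⟩
            · omega
            · exact descFrom_le h
          have hchgp : IsChild (((pos - 1) / 2 - 1) / 2) ((pos - 1) / 2) := by
            unfold IsChild; omega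
          rw [getD_set, if_neg (by omega), getD_set]
          by_cases hc : c = pos
          · rw [if_pos (by omega : pos = c ∧ c < heap.length)]
            have := hi' (((pos - 1) / 2 - 1) / 2) ((pos - 1) / 2) hgp hchgp (by omega) (by omega) (by omega)
            omega
          · rw [if_neg (by omega : ¬(pos = c ∧ c < heap.length))]
            have h1 := hi' (((pos - 1) / 2 - 1) / 2) ((pos - 1) / 2) hgp hchgp
              (by omega) (by omega) (by omega)
            have h2 := hi' ((pos - 1) / 2) c (by omega) hch hcl hc (by omega)
            omega)
      refine ⟨H1, ?_, by simpa using H3⟩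
      have hsp1 : (heap.getD pos 0 :: heap.set pos (heap.getD ((pos - 1) / 2) 0)).Perm
          (heap.getD ((pos - 1) / 2) 0 :: heap) := set_perm heap pos _ hlen
      have hval : (heap.set pos (heap.getD ((pos - 1) / 2) 0)).getD ((pos - 1) / 2) 0
          = heap.getD ((pos - 1) / 2) 0 := by
        rw [getD_set, if_neg (by omega)]
      rw [hval] at H2
      have key : (heap.getD ((pos - 1) / 2) 0 ::
          (heap.getD pos 0 :: pySiftdownLoop (heap.set pos (heap.getD ((pos - 1) / 2) 0)) s ((pos - 1) / 2) x)).Perm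
          (heap.getD ((pos - 1) / 2) 0 :: (x :: heap)) := by
        refine (List.Perm.swap _ _ _).trans ?_
        refine (List.Perm.cons _ H2).trans ?_
        refine (List.Perm.swap _ _ _).trans ?_
        refine (List.Perm.cons _ hsp1).trans ?_
        exact List.Perm.swap _ _ _
      exact key.cons_inv
    · rw [if_neg hlt]
      refine ⟨?_, set_perm heap pos x hlen, by simp⟩
      intro p c hscp hch hcl
      simp only [List.length_set] at hcl
      by_cases hc : c = pos
      · have hp : p = (pos - 1) / 2 := by rcases hch with h | h <;> omega
        rw [getD_set, getD_set, if_neg (by omega : ¬(pos = p ∧ p < heap.length)),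
            if_pos (by omega : pos = c ∧ c < heap.length)]
        have : heap.getD p 0 = heap.getD ((pos - 1) / 2) 0 := by rw [hp]
        omega
      · exact hi p c hscp hch hcl hc
  · rw [if_neg hsp]
    have hpos : pos = s := by have := descFrom_le hdesc; omega
    refine ⟨?_, set_perm heap pos x hlen, by simp⟩
    intro p c hscp hch hcl
    simp only [List.length_set] at hcl
    by_cases hc : c = pos
    · exfalso; rcases hch with h | h <;> omega
    · exact hi p c hscp hch hcl hc

theorem sul_eq (heap : List Int) (endpos s pos : Nat) (x : Int) :
    pySiftupLoop heap endpos s pos x =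
      if 2 * pos + 1 < endpos then
        pySiftupLoop
          (heap.set pos (heap.getD
            (if 2 * pos + 2 < endpos ∧ ¬ (heap.getD (2 * pos + 1) 0 < heap.getD (2 * pos + 2) 0)
             then 2 * pos + 2 else 2 * pos + 1) 0)) endpos s
          (if 2 * pos + 2 < endpos ∧ ¬ (heap.getD (2 * pos + 1) 0 < heap.getD (2 * pos + 2) 0)
           then 2 * pos + 2 else 2 * pos + 1) x
      else pySiftdownLoop (heap.set pos x) s pos x := by
  rw [pySiftupLoop]
  split_ifs with h1 h2 <;> simp_all

theorem sul_spec (s : Nat) (x : Int) (n : Nat) :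
    ∀ k pos (heap : List Int), n - pos = k → heap.length = n → pos < n → DescFrom s pos →
    (∀ p c, s ≤ p → IsChild p c → c < n → p ≠ pos →
      heap.getD p 0 ≤ heap.getD c 0) →
    (∀ c, IsChild pos c → c < n → pos ≠ s →
      heap.getD ((pos - 1) / 2) 0 ≤ heap.getD c 0) →
    HeapFrom s (pySiftupLoop heap n s pos x) ∧
    (heap.getD pos 0 :: pySiftupLoop heap n s pos x).Perm (x :: heap) ∧
    (pySiftupLoop heap n s pos x).length = n := by
  intro k
  induction k using Nat.strong_induction_on with
  | _ k ih =>
  intro pos heap hk hlenn hlen hdesc ha hb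
  rw [sul_eq]
  by_cases h1 : 2 * pos + 1 < n
  · rw [if_pos h1]
    -- the chosen child
    generalize hcpd : (if 2 * pos + 2 < n ∧ ¬ (heap.getD (2 * pos + 1) 0 < heap.getD (2 * pos + 2) 0)
        then 2 * pos + 2 else 2 * pos + 1) = cp
    have hcp : cp = 2 * pos + 1 ∨ cp = 2 * pos + 2 := by
      rw [← hcpd]; split_ifs <;> omega
    have hcpn : cp < n := by rw [← hcpd]; split_ifs <;> omega
    have hcpmin : ∀ c, IsChild pos c → c < n → heap.getD cp 0 ≤ heap.getD c 0 := by
      intro c hch hcl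
      rw [← hcpd]
      split_ifs with hcond
      · rcases hch with h | h <;> subst h
        · omega
        · omega
      · rcases hch with h | h <;> subst h
        · omega
        · have hlt2 : heap.getD (2 * pos + 1) 0 < heap.getD (2 * pos + 2) 0 := by
            by_contra hno
            exact hcond ⟨by omega, hno⟩
          exact le_of_lt hlt2
    have hchcp : IsChild pos cp := by unfold IsChild; omega
    have hdesc' : DescFrom s cp := by
      rw [descFrom_iff]
      right
      constructor
      · have := descFrom_le hdesc; omega
      · have : (cp - 1) / 2 = pos := by omega
        rw [this]; exact hdesc
    obtain ⟨H1, H2, H3⟩ := ih (n - cp) (by omega) cp (heap.set pos (heap.getD cp 0))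
      rfl (by simpa using hlenn) hcpn hdesc'
      (by
        intro p c hsc hch hcl hpcp
        have hpc : p < c := by rcases hch with h | h <;> omega
        rw [getD_set, getD_set]
        by_cases hc : c = pos
        · have hp : p = (pos - 1) / 2 := by rcases hch with h | h <;> omega
          have hposne : pos ≠ s := by
            intro he; rcases hch with h | h <;> omega
          have := hb cp hchcp hcpn hposne
          rw [if_neg (by omega : ¬(pos = p ∧ p < heap.length)),
              if_pos (by omega : pos = c ∧ c < heap.length)]
          have hpv : heap.getD p 0 = heap.getD ((pos - 1) / 2) 0 := by rw [hp]
          omega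
        · by_cases hp : p = pos
          · -- c is cp (excluded: p ≠ cp but c could = cp) or the sibling
            rw [if_pos (by omega : pos = p ∧ p < heap.length),
                if_neg (by omega : ¬(pos = c ∧ c < heap.length))]
            exact hcpmin c (by rwa [hp] at hch) hcl
          · rw [if_neg (by omega : ¬(pos = p ∧ p < heap.length)),
                if_neg (by omega : ¬(pos = c ∧ c < heap.length))]
            exact ha p c hsc hch hcl hp)
      (by
        intro c hch hcl hcps
        have hcc : c = 2 * cp + 1 ∨ c = 2 * cp + 2 := hch
        have hcppos : (cp - 1) / 2 = pos := by omega
        rw [hcppos, getD_set, getD_set,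
            if_pos (by omega : pos = pos ∧ pos < heap.length),
            if_neg (by omega : ¬(pos = c ∧ c < heap.length))]
        exact ha cp c (by have := descFrom_le hdesc; omega) hch hcl (by omega))
    refine ⟨H1, ?_, H3⟩
    have hval : (heap.set pos (heap.getD cp 0)).getD cp 0 = heap.getD cp 0 := by
      rw [getD_set, if_neg (by omega)]
    rw [hval] at H2
    have hsp1 : (heap.getD pos 0 :: heap.set pos (heap.getD cp 0)).Perm
        (heap.getD cp 0 :: heap) := set_perm heap pos _ (by omega)
    have key : (heap.getD cp 0 ::
        (heap.getD pos 0 :: pySiftupLoop (heap.set pos (heap.getD cp 0)) n s cp x)).Perm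
        (heap.getD cp 0 :: (x :: heap)) := by
      refine (List.Perm.swap _ _ _).trans ?_
      refine (List.Perm.cons _ H2).trans ?_
      refine (List.Perm.swap _ _ _).trans ?_
      refine (List.Perm.cons _ hsp1).trans ?_
      exact List.Perm.swap _ _ _
    exact key.cons_inv
  · rw [if_neg h1]
    obtain ⟨H1, H2, H3⟩ := sdl_spec s x pos (heap.set pos x)
      (by simpa using by omega)
      hdesc
      (by
        intro p c hsc hch hcl hcne
        simp only [List.length_set] at hcl
        rw [getD_set2, getD_set2]
        by_cases hp : p = pos
        · exfalso; rcases hch with h | h <;> omega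
        · by_cases hc : c = pos
          · omega
          · rw [if_neg (by omega : ¬(pos = p ∧ p < heap.length)),
                if_neg (by omega : ¬(pos = p ∧ p < heap.length)),
                if_neg (by omega : ¬(pos = c ∧ c < heap.length)),
                if_neg (by omega : ¬(pos = c ∧ c < heap.length))]
            exact ha p c hsc hch (by omega) hp)
      (by
        intro c hch hcl hps
        exfalso
        simp only [List.length_set] at hcl
        rcases hch with h | h <;> omega)
    have hgd : (heap.set pos x).getD pos 0 = x := by
      rw [getD_set, if_pos ⟨rfl, by omega⟩]
    rw [hgd] at H2
    refine ⟨H1, ?_, by simp at H3; omega⟩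
    have hres : (pySiftdownLoop (heap.set pos x) s pos x).Perm (heap.set pos x) :=
      H2.cons_inv
    exact ((List.Perm.cons _ hres).trans (set_perm heap pos x (by omega)))

theorem pySiftup_spec (s : Nat) (heap : List Int) (hs : s < heap.length)
    (h : HeapFrom (s + 1) heap) :
    HeapFrom s (pySiftup heap s) ∧ (pySiftup heap s).Perm heap ∧
    (pySiftup heap s).length = heap.length := by
  obtain ⟨H1, H2, H3⟩ := sul_spec s (heap.getD s 0) heap.length (heap.length - s) s heap
    (by omega) rfl hs
    (by rw [descFrom_iff]; left; rfl)
    (by intro p c h1 h2 h3 h4; exact h p c (by omega) h2 h3)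
    (by intro c _ _ hss; exact absurd rfl hss)
  exact ⟨H1, H2.cons_inv, H3⟩

theorem heapify_aux (n : Nat) :
    ∀ k (heap : List Int), heap.length = n → 2 * k ≤ n → HeapFrom k heap →
    HeapFrom 0 ((List.range k).reverse.foldl (fun h i => pySiftup h i) heap) ∧
    ((List.range k).reverse.foldl (fun h i => pySiftup h i) heap).Perm heap ∧
    ((List.range k).reverse.foldl (fun h i => pySiftup h i) heap).length = n := by
  intro k
  induction k with
  | zero => intro heap hlen _ hh; exact ⟨hh, List.Perm.refl _, hlen⟩
  | succ k ihk =>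
    intro heap hlen hkn hh
    rw [List.range_succ, List.reverse_append, List.reverse_singleton]
    simp only [List.singleton_append, List.foldl_cons]
    obtain ⟨G1, G2, G3⟩ := pySiftup_spec k heap (by omega) hh
    obtain ⟨H1, H2, H3⟩ := ihk (pySiftup heap k) (by omega) (by omega) G1
    exact ⟨H1, H2.trans G2, H3⟩

theorem pyHeapify_spec (A : List Int) :
    HeapFrom 0 (pyHeapify A) ∧ (pyHeapify A).Perm A ∧ (pyHeapify A).length = A.length := by
  unfold pyHeapify
  exact heapify_aux A.length (A.length / 2) A rfl (by omega)
    (by intro p c h1 h2 h3; exfalso; rcases h2 with h | h <;> omega)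

theorem root_min {l : List Int} (h : HeapFrom 0 l) : ∀ y ∈ l, l.getD 0 0 ≤ y := by
  have key : ∀ i, i < l.length → l.getD 0 0 ≤ l.getD i 0 := by
    intro i
    induction i using Nat.strong_induction_on with
    | _ i ih =>
    intro hi
    rcases Nat.eq_zero_or_pos i with rfl | hpos
    · exact le_refl _
    · have hch : IsChild ((i - 1) / 2) i := by unfold IsChild; omega
      have := h ((i - 1) / 2) i (by omega) hch hi
      have h2 := ih ((i - 1) / 2) (by omega) (by omega)
      omega
  intro y hy
  obtain ⟨i, hi, rfl⟩ := List.mem_iff_getElem.1 hy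
  have := key i hi
  rwa [List.getD_eq_getElem l 0 hi] at this

theorem getD_append_lt (l t : List Int) (j : Nat) (h : j < l.length) :
    (l ++ t).getD j 0 = l.getD j 0 := by
  simp only [List.getD_eq_getElem?_getD, List.getElem?_append_left h]

theorem getD_append_len (l : List Int) (x : Int) :
    (l ++ [x]).getD l.length 0 = x := by
  simp [List.getD_eq_getElem?_getD]

theorem getD_dropLast (l : List Int) (j : Nat) (h : j + 1 < l.length) :
    l.dropLast.getD j 0 = l.getD j 0 := by
  rw [List.getD_eq_getElem l.dropLast 0 (by simp; omega),
      List.getD_eq_getElem l 0 (by omega), List.getElem_dropLast]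

theorem pyHeappush_spec {heap : List Int} (h : HeapFrom 0 heap) (x : Int) :
    HeapFrom 0 (pyHeappush heap x) ∧ (pyHeappush heap x).Perm (x :: heap) ∧
    (pyHeappush heap x).length = heap.length + 1 := by
  unfold pyHeappush
  obtain ⟨H1, H2, H3⟩ := sdl_spec 0 x heap.length (heap ++ [x])
    (by simp)
    (descFrom_zero _)
    (by
      intro p c _ hch hcl hcne
      simp only [List.length_append, List.length_singleton] at hcl
      have hpc : p < c := by rcases hch with h' | h' <;> omega
      rw [getD_set, getD_set,
          if_neg (by simp; omega), if_neg (by simp; omega),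
          getD_append_lt _ _ p (by omega), getD_append_lt _ _ c (by omega)]
      exact h p c (by omega) hch (by omega))
    (by
      intro c hch hcl _
      exfalso
      simp only [List.length_append, List.length_singleton] at hcl
      rcases hch with h' | h' <;> omega)
  have hgd : (heap ++ [x]).getD heap.length 0 = x := getD_append_len heap x
  rw [hgd] at H2
  refine ⟨H1, ?_, by simpa using H3⟩
  have hres := H2.cons_inv
  exact hres.trans (List.perm_append_singleton x heap)

theorem pyHeappop_spec {heap : List Int} (hne : heap ≠ []) (h : HeapFrom 0 heap) :
    ∃ rest, pyHeappop heap = some (heap.getD 0 0, rest) ∧ HeapFrom 0 rest ∧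
      (heap.getD 0 0 :: rest).Perm heap ∧ rest.length + 1 = heap.length := by
  have hlast : heap.getLast? = some (heap.getLast hne) := List.getLast?_eq_some_getLast hne
  simp only [pyHeappop, hlast]
  by_cases hemp : heap.dropLast.isEmpty
  · -- singleton heap
    have hl1 : heap.length = 1 := by
      have := List.isEmpty_iff.1 hemp
      have hld : heap.dropLast.length = heap.length - 1 := List.length_dropLast
      rw [this] at hld
      simp at hld
      have : 0 < heap.length := List.length_pos_of_ne_nil hne
      omega
    obtain ⟨a, rfl⟩ := List.length_eq_one_iff.1 hl1
    simp only [if_pos hemp]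
    exact ⟨[], by simp [List.getLast], by simp [HeapFrom], by simp, by simp⟩
  · rw [if_neg hemp]
    have hlen2 : 2 ≤ heap.length := by
      have : ¬ heap.dropLast.length = 0 := by
        intro h0; exact hemp (List.isEmpty_iff.2 (List.length_eq_zero_iff.1 h0))
      have hld : heap.dropLast.length = heap.length - 1 := List.length_dropLast
      omega
    have hr0 : heap.dropLast.getD 0 0 = heap.getD 0 0 := getD_dropLast heap 0 (by omega)
    have hset : ∀ j, j ≠ 0 → j + 1 < heap.length →
        ((heap.dropLast.set 0 (heap.getLast hne)).getD j 0) = heap.getD j 0 := by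
      intro j hj hjl
      rw [getD_set, if_neg (by simp; omega), getD_dropLast heap j hjl]
    obtain ⟨H1, H2, H3⟩ := pySiftup_spec 0 (heap.dropLast.set 0 (heap.getLast hne))
      (by simp; omega)
      (by
        intro p c hp hch hcl
        simp only [List.length_set, List.length_dropLast] at hcl
        have hpc : p < c := by rcases hch with h' | h' <;> omega
        rw [hset p (by omega) (by omega), hset c (by omega) (by omega)]
        exact h p c (by omega) hch (by omega))
    refine ⟨_, by rw [hr0], ?_, ?_, ?_⟩
    · exact H1
    · refine (List.Perm.cons _ H2).trans ?_
      have hsp := set_perm heap.dropLast 0 (heap.getLast hne) (by simp; omega)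
      rw [hr0] at hsp
      refine hsp.trans ?_
      refine (List.perm_append_singleton _ _).symm.trans ?_
      rw [List.dropLast_append_getLast hne]
    · simp only [H3, List.length_set, List.length_dropLast]
      omega

theorem bPopMin_spec {l : List Int} (hne : l ≠ []) :
    ∃ m rest, bPopMin l = some (m, rest) ∧ (∀ y ∈ l, m ≤ y) ∧
      (m :: rest).Perm l ∧ rest.length + 1 = l.length := by
  obtain ⟨m, hm⟩ : ∃ m, PySem.List.min? l (fun x => x) = some m := by
    cases h : PySem.List.min? l (fun x => x) with
    | none => exact absurd ((PySem.List.min?_eq_none_iff _ _).1 h) hne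
    | some m => exact ⟨m, rfl⟩
  have hmem : m ∈ l := PySem.List.min?_mem hm
  have hmin : ∀ y ∈ l, m ≤ y := PySem.List.min?_isMin hm
  obtain ⟨i, hidx⟩ : ∃ i, PySem.List.index? l m = some i := by
    cases h : PySem.List.index? l m with
    | none => exact absurd hmem ((PySem.List.index?_eq_none_iff _ _).1 h)
    | some i => exact ⟨i, rfl⟩
  obtain ⟨hk, hkv, _⟩ := PySem.List.getElem_of_index?_eq_some hidx
  refine ⟨m, l.eraseIdx i, ?_, hmin, ?_, ?_⟩
  · simp only [bPopMin, hm, hidx, PySem.List.pop?_natCast l i hk, hkv]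
  · rw [← hkv]; exact cons_eraseIdx_perm hk
  · rw [List.length_eraseIdx_of_lt hk]; omega

theorem step_eq {h b : List Int} (hh : HeapFrom 0 h) (hp : h.Perm b) (hlen : 2 ≤ h.length) :
    ∃ h' b', solveStepA (some h) = some h' ∧ solveStepB (some b) = some b' ∧
      HeapFrom 0 h' ∧ h'.Perm b' ∧ h'.length = h.length := by
  have hne : h ≠ [] := by intro he; rw [he] at hlen; simp at hlen
  obtain ⟨h1, hpop1, hh1, hperm1, hlen1⟩ := pyHeappop_spec hne hh
  have hne1 : h1 ≠ [] := by
    intro he; rw [he] at hlen1; simp at hlen1; omega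
  obtain ⟨h2, hpop2, hh2, hperm2, hlen2⟩ := pyHeappop_spec hne1 hh1
  have hbne : b ≠ [] := by
    intro he; rw [he] at hp; have := hp.length_eq; simp only [List.length_nil] at this; omega
  obtain ⟨m1, b1, hbpop1, hmin1, hbperm1, hblen1⟩ := bPopMin_spec hbne
  -- the two roots are the two minima
  have hroot1 : ∀ y ∈ h, h.getD 0 0 ≤ y := root_min hh
  have hmemroot : h.getD 0 0 ∈ h := by
    rw [List.getD_eq_getElem h 0 (by omega)]
    exact List.getElem_mem _
  have he1 : h.getD 0 0 = m1 := by
    have hm1h : m1 ∈ h := hp.symm.subset (hbperm1.subset (List.mem_cons_self))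
    have hrb : h.getD 0 0 ∈ b := hp.subset hmemroot
    exact le_antisymm (hroot1 m1 hm1h) (hmin1 _ hrb)
  have hperm1b : h1.Perm b1 := by
    have : (h.getD 0 0 :: h1).Perm (m1 :: b1) := hperm1.trans (hp.trans hbperm1.symm)
    rw [he1] at this
    exact this.cons_inv
  have hbne1 : b1 ≠ [] := by
    intro he; rw [he] at hperm1b; have := hperm1b.length_eq; simp only [List.length_nil] at this; omega
  obtain ⟨m2, b2, hbpop2, hmin2, hbperm2, hblen2⟩ := bPopMin_spec hbne1
  have hroot2 : ∀ y ∈ h1, h1.getD 0 0 ≤ y := root_min hh1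
  have hmemroot2 : h1.getD 0 0 ∈ h1 := by
    rw [List.getD_eq_getElem h1 0 (by omega)]
    exact List.getElem_mem _
  have he2 : h1.getD 0 0 = m2 := by
    have hm2h : m2 ∈ h1 := hperm1b.symm.subset (hbperm2.subset (List.mem_cons_self))
    have hrb : h1.getD 0 0 ∈ b1 := hperm1b.subset hmemroot2
    exact le_antisymm (hroot2 m2 hm2h) (hmin2 _ hrb)
  have hperm2b : h2.Perm b2 := by
    have : (h1.getD 0 0 :: h2).Perm (m2 :: b2) := hperm2.trans (hperm1b.trans hbperm2.symm)
    rw [he2] at this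
    exact this.cons_inv
  obtain ⟨P1, P2, P3⟩ := pyHeappush_spec hh2 (h.getD 0 0 + h1.getD 0 0)
  obtain ⟨Q1, Q2, Q3⟩ := pyHeappush_spec P1 (h.getD 0 0 + h1.getD 0 0)
  refine ⟨pyHeappush (pyHeappush h2 (h.getD 0 0 + h1.getD 0 0)) (h.getD 0 0 + h1.getD 0 0),
    (b2 ++ [m1 + m2]) ++ [m1 + m2], ?_, ?_, Q1, ?_, ?_⟩
  · simp only [solveStepA, hpop1, hpop2]
  · simp only [solveStepB, hbpop1, hbpop2]
  · refine Q2.trans ?_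
    refine (List.Perm.cons _ P2).trans ?_
    rw [he1, he2]
    refine ?_
    have hb2 : ((b2 ++ [m1 + m2]) ++ [m1 + m2]).Perm ((m1 + m2) :: ((m1 + m2) :: b2)) := by
      refine (List.perm_append_singleton _ _).trans ?_
      exact List.Perm.cons _ (List.perm_append_singleton _ _)
    exact ((List.Perm.cons _ (List.Perm.cons _ hperm2b)).trans hb2.symm)
  · omega

theorem rounds_eq (k : Nat) : ∀ (h b : List Int), HeapFrom 0 h → h.Perm b →
    (2 ≤ h.length ∨ k = 0) →
    ∃ h' b', (List.range k).foldl (fun st _ => solveStepA st) (some h) = some h' ∧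
      (List.range k).foldl (fun st _ => solveStepB st) (some b) = some b' ∧
      HeapFrom 0 h' ∧ h'.Perm b' ∧ h'.length = h.length := by
  induction k with
  | zero =>
    intro h b hh hp _
    exact ⟨h, b, by simp, by simp, hh, hp, rfl⟩
  | succ k ihk =>
    intro h b hh hp hl
    obtain ⟨h', b', E1, E2, H1, H2, H3⟩ := ihk h b hh hp
      (by rcases hl with hl | hl
          · exact Or.inl hl
          · omega)
    rcases hl with hl | hl
    · obtain ⟨h'', b'', F1, F2, G1, G2, G3⟩ := step_eq H1 H2 (by omega)
      refine ⟨h'', b'', ?_, ?_, G1, G2, by omega⟩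
      · rw [List.range_succ, List.foldl_append, E1]
        simpa using F1
      · rw [List.range_succ, List.foldl_append, E2]
        simpa using F2
    · omega

theorem foldl_add_init (l : List Int) : ∀ init : Int, l.foldl (· + ·) init = init + l.sum := by
  induction l with
  | nil => intro init; simp
  | cons x t ih =>
    intro init
    simp only [List.foldl_cons, List.sum_cons, ih]
    ring

theorem foldl_add_eq_of_perm {l₁ l₂ : List Int} (h : l₁.Perm l₂) :
    l₁.foldl (· + ·) 0 = l₂.foldl (· + ·) 0 := by
  rw [foldl_add_init, foldl_add_init, h.sum_eq]

theorem solve_eq_alt (N M : Int) (A : List Int) (hpre : M ≤ 0 ∨ 2 ≤ A.length) :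
    solve N M A = solve_alt N M A := by
  obtain ⟨K1, K2, K3⟩ := pyHeapify_spec A
  obtain ⟨h', b', E1, E2, _, HP, _⟩ := rounds_eq M.toNat (pyHeapify A) A K1 K2
    (by rcases hpre with hp | hp
        · right; omega
        · left; omega)
  unfold solve solve_alt
  rw [E1, E2]
  exact foldl_add_eq_of_perm HP

-- ===== VERDICT (by name: the statement is the Claim_ definition above) =====
theorem solve_spec : Claim_equal_solve := by
  intro N M A _ hpre
  show solve N M A = solve_alt N M A
  exact solve_eq_alt N M A hpre
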